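-- pv_equiv track=rewrite | github.com/Christina-Russo/Six-Sided-Dice-TEBS | product/backend/test.py | generate_snakes_and_ladders_dict
-- ===== SOURCE A (Python) =====
-- def generate_snakes_and_ladders_dict(n_rows=10, n_cols=10):
--     board_dict = {}
--     num = n_rows * n_cols  # Start with 100 in a 10x10 board
--
--     for r in range(n_rows):
--         if r % 2 == 0:
--             # Even row, left to right
--             for c in range(n_cols):
--                 board_dict[(r, c)] = num
--                 num -= 1
--         else:
--             # Odd row, right to left
--             for c in range(n_cols - 1, -1, -1):
--                 board_dict[(r, c)] = num
--                 num -= 1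
--     return board_dict
-- ===== SOURCE B (Python) =====
-- def generate_snakes_and_ladders_dict(n_rows=10, n_cols=10):
--     total = n_rows * n_cols
--     return {
--         (k // n_cols,
--          k % n_cols if (k // n_cols) % 2 == 0 else n_cols - 1 - k % n_cols): total - k
--         for k in range(total)
--     }
-- ===== Notes on version B (the rewrite author's own statement) =====
-- stated objective: simpler
-- what changed: Replaces the stateful decrementing counter and the two direction-dependent nested loops with a single dict comprehension over the flat traversal index k, computing each cell's row, boustrophedon column and value by closed-form arithmetic.
-- outside the precondition, e.g. on generate_snakes_and_ladders_dict(-1, -1): A returns {}, B returns {(0, 0): 1}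
import Mathlib
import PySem

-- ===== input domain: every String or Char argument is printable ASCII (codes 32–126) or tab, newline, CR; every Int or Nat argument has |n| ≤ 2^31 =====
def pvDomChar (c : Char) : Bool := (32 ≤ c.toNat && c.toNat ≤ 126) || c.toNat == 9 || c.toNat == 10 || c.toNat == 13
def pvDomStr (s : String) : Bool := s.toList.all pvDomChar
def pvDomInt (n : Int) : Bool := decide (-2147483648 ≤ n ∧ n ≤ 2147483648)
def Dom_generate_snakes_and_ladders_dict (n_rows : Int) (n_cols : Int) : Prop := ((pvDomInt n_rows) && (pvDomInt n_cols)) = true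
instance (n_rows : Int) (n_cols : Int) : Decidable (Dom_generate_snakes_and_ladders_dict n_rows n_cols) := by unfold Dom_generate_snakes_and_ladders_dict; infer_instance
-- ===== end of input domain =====

-- B replaces A's stateful decrementing counter and two direction-dependent nested loops by a single
-- dict comprehension over the flat traversal index with closed-form row/column/value arithmetic (objective: simpler).


-- ===== PORT A =====
-- The dict with (row, col) keys is a PySem.Dict (Int × Int) Int; the final '.items.map' only
-- reshapes ((r,c),v) entries into the required (r,c,v) triple type.
def generate_snakes_and_ladders_dict (n_rows : Int) (n_cols : Int) : List (Int × Int × Int) :=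
  let st := (PySem.List.pyRange 0 n_rows 1).foldl
    (fun (st : PySem.Dict (Int × Int) Int × Int) r =>
      if PySem.Int.mod r 2 = 0 then
        -- Even row, left to right
        (PySem.List.pyRange 0 n_cols 1).foldl
          (fun st2 c => (st2.1.insert (r, c) st2.2, st2.2 - 1)) st
      else
        -- Odd row, right to left
        (PySem.List.pyRange (n_cols - 1) (-1) (-1)).foldl
          (fun st2 c => (st2.1.insert (r, c) st2.2, st2.2 - 1)) st)
    (PySem.Dict.empty, n_rows * n_cols)
  st.1.items.map (fun p => (p.1.1, p.1.2, p.2))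

-- ===== PORT B =====
def generate_snakes_and_ladders_dict_alt (n_rows : Int) (n_cols : Int) : List (Int × Int × Int) :=
  let total := n_rows * n_cols
  ((PySem.List.pyRange 0 total 1).foldl
    (fun (d : PySem.Dict (Int × Int) Int) k =>
      d.insert (PySem.Int.floordiv k n_cols,
        if PySem.Int.mod (PySem.Int.floordiv k n_cols) 2 = 0 then PySem.Int.mod k n_cols
        else n_cols - 1 - PySem.Int.mod k n_cols)
        (total - k)) PySem.Dict.empty).items.map (fun p => (p.1.1, p.1.2, p.2))

-- ===== PRECONDITION & SPEC =====
-- Pre_ restricts to the natural domain where at least one dimension is non-negative; when BOTH are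
-- negative (so the product is positive) A returns an empty dict while B's flat-index traversal
-- would produce spurious entries.
def Pre_generate_snakes_and_ladders_dict (n_rows : Int) (n_cols : Int) : Prop :=
  0 ≤ n_rows ∨ 0 ≤ n_cols
instance (n_rows : Int) (n_cols : Int) : Decidable (Pre_generate_snakes_and_ladders_dict n_rows n_cols) := by unfold Pre_generate_snakes_and_ladders_dict; infer_instance
def pvWitness_generate_snakes_and_ladders_dict : Int × Int := (3, 4)

def Spec_generate_snakes_and_ladders_dict (n_rows : Int) (n_cols : Int) (out : List (Int × Int × Int)) : Prop := out = generate_snakes_and_ladders_dict_alt n_rows n_cols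
instance (n_rows : Int) (n_cols : Int) (out : List (Int × Int × Int)) : Decidable (Spec_generate_snakes_and_ladders_dict n_rows n_cols out) := by unfold Spec_generate_snakes_and_ladders_dict; infer_instance

-- ===== CLAIM (what is proved, stated in full; the proofs are below) =====
def Claim_equal_generate_snakes_and_ladders_dict : Prop := ∀ (n_rows : Int) (n_cols : Int), Dom_generate_snakes_and_ladders_dict n_rows n_cols → Pre_generate_snakes_and_ladders_dict n_rows n_cols → Spec_generate_snakes_and_ladders_dict n_rows n_cols (generate_snakes_and_ladders_dict n_rows n_cols)

-- ===== LEMMAS AND PROOFS =====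

-- the canonical entry written by both programs for flat index k (with C = n_cols, T = total)
def pvEntry (C T k : Int) : (Int × Int) × Int :=
  ((PySem.Int.floordiv k C,
    if PySem.Int.mod (PySem.Int.floordiv k C) 2 = 0 then PySem.Int.mod k C
    else C - 1 - PySem.Int.mod k C), T - k)

def pvRowItems (r : Int) (num : Int) : List Int → List ((Int × Int) × Int)
  | [] => []
  | c :: t => ((r, c), num) :: pvRowItems r (num - 1) t

theorem pv_inner_fold (cs : List Int) (r : Int) (d : PySem.Dict (Int × Int) Int) (num : Int)
    (hnd : cs.Nodup) (hfresh : ∀ c ∈ cs, d.contains (r, c) = false) :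
    cs.foldl (fun st2 c => (st2.1.insert (r, c) st2.2, st2.2 - 1)) (d, num)
    = (PySem.Dict.mk (d.items ++ pvRowItems r num cs), num - cs.length) := by
  induction cs generalizing d num with
  | nil => cases d; simp [pvRowItems]
  | cons c t ih =>
    rw [List.foldl_cons]
    rw [ih (d.insert (r, c) num) (num - 1) hnd.of_cons]
    · rw [PySem.Dict.items_insert_of_not_contains d num (hfresh c (by simp))]
      simp [pvRowItems]
      ring_nf
    · intro c' hc'
      rw [PySem.Dict.contains_insert]
      have hne : c' ≠ c := fun h => (List.nodup_cons.mp hnd).1 (h ▸ hc')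
      simp [hfresh c' (List.mem_cons_of_mem _ hc'), hne]

theorem pv_rowItems_range (n : Nat) (r num : Int) (g : Nat → Int) :
    pvRowItems r num ((List.range n).map g)
    = (List.range n).map (fun i => ((r, g i), num - i)) := by
  induction n generalizing num g with
  | zero => simp [pvRowItems]
  | succ n ih =>
    rw [List.range_succ_eq_map, List.map_cons, List.map_cons, List.map_map, List.map_map]
    simp only [pvRowItems]
    simp only [Function.comp_def]
    rw [ih (num - 1) (fun i => g i.succ)]
    simp only [Nat.cast_zero, sub_zero, List.cons.injEq, true_and]
    refine List.map_congr_left fun i _ => ?_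
    simp only [Nat.succ_eq_add_one]
    push_cast
    ring_nf

theorem pv_fd_row (R C j : Int) (h0 : 0 ≤ j) (hj : j < C) :
    PySem.Int.floordiv (R * C + j) C = R ∧ PySem.Int.mod (R * C + j) C = j := by
  have hC : 0 < C := lt_of_le_of_lt h0 hj
  have hfd : PySem.Int.floordiv (R * C + j) C = R := by
    rw [PySem.Int.floordiv_eq_iff_of_pos hC]
    constructor <;> nlinarith
  refine ⟨hfd, ?_⟩
  have := PySem.Int.floordiv_mul_add_mod (R * C + j) C
  rw [hfd] at this; linarith

theorem pv_alt_items (n_rows n_cols : Int) (h1 : 0 ≤ n_rows) (h2 : 0 ≤ n_cols) :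
    ((PySem.List.pyRange 0 (n_rows * n_cols) 1).foldl
      (fun (d : PySem.Dict (Int × Int) Int) k =>
        d.insert (PySem.Int.floordiv k n_cols,
          if PySem.Int.mod (PySem.Int.floordiv k n_cols) 2 = 0 then PySem.Int.mod k n_cols
          else n_cols - 1 - PySem.Int.mod k n_cols)
          (n_rows * n_cols - k)) PySem.Dict.empty).items
    = (PySem.List.pyRange 0 (n_rows * n_cols) 1).map (pvEntry n_cols (n_rows * n_cols)) := by
  have h := PySem.Dict.items_foldl_insert_fresh (PySem.List.pyRange 0 (n_rows * n_cols) 1)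
      (fun k => (PySem.Int.floordiv k n_cols,
        if PySem.Int.mod (PySem.Int.floordiv k n_cols) 2 = 0 then PySem.Int.mod k n_cols
        else n_cols - 1 - PySem.Int.mod k n_cols))
      (fun k => n_rows * n_cols - k) PySem.Dict.empty
      (by intro a _; simp)
      ?_
  · rw [h]; rfl
  · refine List.Nodup.map_on ?_ (PySem.List.nodup_pyRange_one 0 (n_rows * n_cols))
    intro x hx y hy hxy
    rw [PySem.List.mem_pyRange_one] at hx hy
    have hC : 0 < n_cols := by
      by_cases h : 0 < n_cols
      · exact h
      · exfalso
        have : n_rows * n_cols ≤ 0 := mul_nonpos_of_nonneg_of_nonpos h1 (by omega)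
        omega
    have hr : PySem.Int.floordiv x n_cols = PySem.Int.floordiv y n_cols :=
      congrArg Prod.fst hxy
    have hc := congrArg Prod.snd hxy
    simp only at hr hc
    have hmx : PySem.Int.mod x n_cols = PySem.Int.mod y n_cols := by
      rw [hr] at hc
      split_ifs at hc with hpar
      · exact hc
      · omega
    have ex := PySem.Int.floordiv_mul_add_mod x n_cols
    have ey := PySem.Int.floordiv_mul_add_mod y n_cols
    rw [hr, hmx] at ex
    omega

theorem pv_row_step (n_rows n_cols : Int) (h2 : 0 ≤ n_cols) (R : Nat) (g : Nat → Int)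
    (hginj : ∀ i j, i < n_cols.toNat → j < n_cols.toNat → g i = g j → i = j)
    (hcol : ∀ i : Nat, i < n_cols.toNat →
      (if PySem.Int.mod ((R : Int)) 2 = 0 then PySem.Int.mod ((R : Int) * n_cols + i) n_cols
       else n_cols - 1 - PySem.Int.mod ((R : Int) * n_cols + i) n_cols) = g i) :
    ((List.range n_cols.toNat).map g).foldl
      (fun st2 c => (st2.1.insert ((R : Int), c) st2.2, st2.2 - 1))
      (PySem.Dict.mk ((PySem.List.pyRange 0 ((R : Int) * n_cols) 1).map
        (pvEntry n_cols (n_rows * n_cols))), n_rows * n_cols - (R : Int) * n_cols)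
    = (PySem.Dict.mk ((PySem.List.pyRange 0 (((R : Int) + 1) * n_cols) 1).map
        (pvEntry n_cols (n_rows * n_cols))), n_rows * n_cols - ((R : Int) + 1) * n_cols) := by
  have hRC : (0 : Int) ≤ (R : Int) * n_cols := mul_nonneg (by positivity) h2
  rw [pv_inner_fold _ _ _ _
    (List.Nodup.map_on (fun i hi j hj h => hginj i j (List.mem_range.mp hi) (List.mem_range.mp hj) h)
      (List.nodup_range))
    ?fresh]
  case fresh =>
    intro c hc
    rw [PySem.Dict.contains_mk, List.any_eq_false]
    intro p hp
    obtain ⟨k, hk, rfl⟩ := List.mem_map.mp hp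
    rw [PySem.List.mem_pyRange_one] at hk
    have hCpos : 0 < n_cols := by
      by_cases h : 0 < n_cols
      · exact h
      · exfalso; have : (R : Int) * n_cols ≤ 0 := mul_nonpos_of_nonneg_of_nonpos (by positivity) (by omega)
        omega
    have hlt : PySem.Int.floordiv k n_cols < (R : Int) := by
      rw [PySem.Int.floordiv_lt_iff_lt_mul hCpos]; omega
    simp only [pvEntry, beq_iff_eq, Prod.mk.injEq, not_and]
    intro h; exact absurd h (by omega)
  refine Prod.ext ?_ ?_
  · show PySem.Dict.mk _ = PySem.Dict.mk _
    refine congrArg _ ?_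
    rw [pv_rowItems_range]
    rw [PySem.List.pyRange_one_append 0 ((R : Int) * n_cols) (((R : Int) + 1) * n_cols) hRC
      (by nlinarith)]
    rw [List.map_append]
    refine congrArg _ ?_
    rw [PySem.List.pyRange_one ((R : Int) * n_cols) (((R : Int) + 1) * n_cols)]
    have : (((R : Int) + 1) * n_cols - (R : Int) * n_cols) = n_cols := by ring
    rw [this, List.map_map]
    refine List.map_congr_left fun i hi => ?_
    have hi' : i < n_cols.toNat := List.mem_range.mp hi
    have hiC : (i : Int) < n_cols := by omega
    obtain ⟨hfd, hmod⟩ := pv_fd_row (R : Int) n_cols (i : Int) (by positivity) hiC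
    simp only [Function.comp_apply, pvEntry, hfd, hmod]
    rw [← hcol i hi', hmod]
    simp only [Prod.mk.injEq, true_and]
    ring
  · show n_rows * n_cols - (R : Int) * n_cols - _ = _
    have : ((List.range n_cols.toNat).map g).length = n_cols.toNat := by simp
    rw [this]
    have : ((n_cols.toNat : Nat) : Int) = n_cols := Int.toNat_of_nonneg h2
    rw [this]; ring

theorem pv_a_invariant (n_rows n_cols : Int) (h2 : 0 ≤ n_cols) (R : Nat) :
    (PySem.List.pyRange 0 (R : Int) 1).foldl
      (fun (st : PySem.Dict (Int × Int) Int × Int) r =>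
        if PySem.Int.mod r 2 = 0 then
          (PySem.List.pyRange 0 n_cols 1).foldl
            (fun st2 c => (st2.1.insert (r, c) st2.2, st2.2 - 1)) st
        else
          (PySem.List.pyRange (n_cols - 1) (-1) (-1)).foldl
            (fun st2 c => (st2.1.insert (r, c) st2.2, st2.2 - 1)) st)
      (PySem.Dict.empty, n_rows * n_cols)
    = (PySem.Dict.mk ((PySem.List.pyRange 0 ((R : Int) * n_cols) 1).map
        (pvEntry n_cols (n_rows * n_cols))), n_rows * n_cols - (R : Int) * n_cols) := by
  induction R with
  | zero =>
    rw [show ((0 : Nat) : Int) = 0 from rfl]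
    rw [PySem.List.pyRange_one_eq_nil le_rfl, zero_mul,
      PySem.List.pyRange_one_eq_nil le_rfl]
    simp [PySem.Dict.empty]
  | succ R ih =>
    rw [show ((R + 1 : Nat) : Int) = (R : Int) + 1 by push_cast; ring]
    rw [PySem.List.pyRange_one_succ_right (by positivity), List.foldl_append, ih,
      List.foldl_cons, List.foldl_nil]
    by_cases hpar : PySem.Int.mod (R : Int) 2 = 0
    · rw [if_pos hpar]
      rw [PySem.List.pyRange_one 0 n_cols, sub_zero]
      exact pv_row_step n_rows n_cols h2 R (fun k => 0 + (k : Int))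
        (by intro i j hi hj h; simp only [] at h; omega)
        (by
          intro i hi
          have hiC : (i : Int) < n_cols := by omega
          obtain ⟨-, hmod⟩ := pv_fd_row (R : Int) n_cols (i : Int) (by positivity) hiC
          rw [if_pos hpar, hmod]; ring)
    · rw [if_neg hpar]
      rw [PySem.List.pyRange_neg_one (n_cols - 1) (-1),
        show (n_cols - 1 - (-1)) = n_cols by ring]
      exact pv_row_step n_rows n_cols h2 R (fun k => n_cols - 1 - (k : Int))
        (by intro i j hi hj h; simp only [] at h; omega)
        (by
          intro i hi
          have hiC : (i : Int) < n_cols := by omega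
          obtain ⟨-, hmod⟩ := pv_fd_row (R : Int) n_cols (i : Int) (by positivity) hiC
          rw [if_neg hpar, hmod])

-- ===== VERDICT (by name: the statement is the Claim_ definition above) =====
theorem generate_snakes_and_ladders_dict_spec : Claim_equal_generate_snakes_and_ladders_dict := by
  intro n_rows n_cols _ hpre
  unfold Spec_generate_snakes_and_ladders_dict
  unfold generate_snakes_and_ladders_dict generate_snakes_and_ladders_dict_alt
  simp only []
  by_cases h2 : 0 ≤ n_cols
  · by_cases h1 : 0 ≤ n_rows
    · have hA := pv_a_invariant n_rows n_cols h2 n_rows.toNat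
      rw [Int.toNat_of_nonneg h1] at hA
      simp only [hA, pv_alt_items n_rows n_cols h1 h2]
    · -- n_rows < 0: both loops are empty
      have ht : n_rows * n_cols ≤ 0 := mul_nonpos_of_nonpos_of_nonneg (by omega) h2
      rw [PySem.List.pyRange_one_eq_nil (by omega : n_rows ≤ 0),
        PySem.List.pyRange_one_eq_nil (by omega : n_rows * n_cols ≤ 0)]
      rfl
  · -- n_cols < 0 (and 0 ≤ n_rows by Pre_): every inner row loop is empty
    have h1 : 0 ≤ n_rows := hpre.resolve_right h2
    have ht : n_rows * n_cols ≤ 0 := mul_nonpos_of_nonneg_of_nonpos h1 (by omega)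
    rw [PySem.List.pyRange_one_eq_nil (by omega : n_cols ≤ 0),
      PySem.List.pyRange_neg_one_eq_nil (by omega : n_cols - 1 ≤ -1),
      PySem.List.pyRange_one_eq_nil (by omega : n_rows * n_cols ≤ 0)]
    simp only [List.foldl_nil, ite_self, List.foldl_fixed]
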